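-- pv_equiv track=rewrite | github.com/westreed/ProgrammersAlgorithm | Programmers/Level3/파괴되지 않은 건물.py | solution
-- ===== SOURCE A (Python) =====
-- def solution(board, skill):
--     Answer = 0
--     N, M = len(board[0]), len(board)
--
--     _skill = [[0 for _ in range(N)] for _ in range(M)]
--     for type, r1, c1, r2, c2, degree in skill:
--         value = -degree if type == 1 else degree
--         _skill[r1][c1] += value
--         if c2+1 < N: _skill[r1][c2+1] += -value
--         if r2+1 < M: _skill[r2+1][c1] += -value
--         if c2+1 < N and r2+1 < M: _skill[r2+1][c2+1] += value
--
--     for x in range(1, N):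
--         for y in range(M):
--             _skill[y][x] += _skill[y][x-1]
--
--     for y in range(1, M):
--         for x in range(N):
--             _skill[y][x] += _skill[y-1][x]
--
--     for y in range(M):
--         for x in range(N):
--             board[y][x] += _skill[y][x]
--             if board[y][x] > 0: Answer += 1
--
--     return Answer
-- ===== SOURCE B (Python) =====
-- def solution(board, skill):
--     # Direct per-skill rectangle update (mutates board in place, like A), then one counting pass.
--     for type, r1, c1, r2, c2, degree in skill:
--         value = -degree if type == 1 else degree
--         for r in range(r1, r2 + 1):
--             for c in range(c1, c2 + 1):
--                 board[r][c] += value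
--     return sum(1 for row in board for v in row if v > 0)
-- ===== Notes on version B (the rewrite author's own statement) =====
-- stated objective: simpler
-- what changed: B drops the 2D difference array and prefix-sum passes entirely: it adds each skill's value directly to every cell of its rectangle and then counts positive cells in one pass.
-- outside the precondition, e.g. on solution([[1], [2, 3]], []): A returns 2, B returns 3; on solution([[1, -6], [-6, 1]], [[2, 0, 0, 5, 0, 5]]): A returns 2, B raises IndexError
import Mathlib
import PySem

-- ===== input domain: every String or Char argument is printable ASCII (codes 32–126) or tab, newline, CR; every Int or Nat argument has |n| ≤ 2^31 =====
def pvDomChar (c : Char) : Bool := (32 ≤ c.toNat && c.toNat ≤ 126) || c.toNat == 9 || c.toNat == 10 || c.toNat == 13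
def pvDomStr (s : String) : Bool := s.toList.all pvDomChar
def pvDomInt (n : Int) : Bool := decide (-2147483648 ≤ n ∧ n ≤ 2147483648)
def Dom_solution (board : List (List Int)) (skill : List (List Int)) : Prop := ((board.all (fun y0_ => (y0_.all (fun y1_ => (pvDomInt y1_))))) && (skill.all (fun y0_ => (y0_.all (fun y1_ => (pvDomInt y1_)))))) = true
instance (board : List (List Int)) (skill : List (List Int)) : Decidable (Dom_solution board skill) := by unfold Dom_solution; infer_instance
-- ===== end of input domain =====

-- B replaces A's 2D difference array + prefix-sum passes by adding each skill's value directly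
-- to every cell of its rectangle, then counting positive cells in one pass (objective: simpler).
-- Both A and B mutate `board` in place in Python; the equivalence proved here is about the return value.

-- shared helpers: 2-D read/write with Python index semantics (g[y][x], g[y][x] = v)
def pvGet2 (g : List (List Int)) (y x : Int) : Int :=
  PySem.List.pyGetD (PySem.List.pyGetD g y []) x 0
def pvSet2 (g : List (List Int)) (y x : Int) (v : Int) : List (List Int) :=
  PySem.List.pySetD g y (PySem.List.pySetD (PySem.List.pyGetD g y []) x v)
def pvAdd2 (g : List (List Int)) (y x : Int) (v : Int) : List (List Int) :=
  pvSet2 g y x (pvGet2 g y x + v)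
-- tuple unpacking 'type, r1, c1, r2, c2, degree = s' (raises unless len(s) == 6)
def pvSix (s : List Int) : Option (Int × Int × Int × Int × Int × Int) :=
  match s with
  | [t, r1, c1, r2, c2, d] => some (t, r1, c1, r2, c2, d)
  | _ => none

-- ===== PORT A =====
def solution (board : List (List Int)) (skill : List (List Int)) : Int :=
  let N : Int := (PySem.List.pyGetD board 0 []).length
  let M : Int := board.length
  let g0 : List (List Int) :=
    (PySem.List.pyRange 0 M).map (fun _ => (PySem.List.pyRange 0 N).map (fun _ => (0 : Int)))
  let g1 : List (List Int) := skill.foldl (fun g s =>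
    match pvSix s with
    | some (t, r1, c1, r2, c2, degree) =>
      let value := if t == 1 then -degree else degree
      let g := pvAdd2 g r1 c1 value
      let g := if c2 + 1 < N then pvAdd2 g r1 (c2 + 1) (-value) else g
      let g := if r2 + 1 < M then pvAdd2 g (r2 + 1) c1 (-value) else g
      if c2 + 1 < N ∧ r2 + 1 < M then pvAdd2 g (r2 + 1) (c2 + 1) value else g
    | none => g) g0
  let g2 : List (List Int) := (PySem.List.pyRange 1 N).foldl (fun g x =>
    (PySem.List.pyRange 0 M).foldl (fun g y => pvAdd2 g y x (pvGet2 g y (x - 1))) g) g1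
  let g3 : List (List Int) := (PySem.List.pyRange 1 M).foldl (fun g y =>
    (PySem.List.pyRange 0 N).foldl (fun g x => pvAdd2 g y x (pvGet2 g (y - 1) x)) g) g2
  let st := (PySem.List.pyRange 0 M).foldl (fun st y =>
    (PySem.List.pyRange 0 N).foldl (fun st x =>
      let nv := pvGet2 st.1 y x + pvGet2 g3 y x
      (pvSet2 st.1 y x nv, if nv > 0 then st.2 + 1 else st.2)) st) (board, (0 : Int))
  st.2

-- ===== PORT B =====
def solution_alt (board : List (List Int)) (skill : List (List Int)) : Int :=
  let b2 : List (List Int) := skill.foldl (fun b s =>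
    match pvSix s with
    | some (t, r1, c1, r2, c2, degree) =>
      let value := if t == 1 then -degree else degree
      (PySem.List.pyRange r1 (r2 + 1)).foldl (fun b r =>
        (PySem.List.pyRange c1 (c2 + 1)).foldl (fun b c => pvAdd2 b r c value) b) b
    | none => b) board
  b2.foldl (fun a row => row.foldl (fun a v => if v > 0 then a + 1 else a) a) 0

-- ===== PRECONDITION & SPEC =====
def pvSkillOK (M N : Int) (s : List Int) : Bool :=
  match pvSix s with
  | some (_, r1, c1, r2, c2, _) => decide (0 ≤ r1 ∧ r1 ≤ r2 ∧ r2 < M ∧ 0 ≤ c1 ∧ c1 ≤ c2 ∧ c2 < N)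
  | none => false

-- Pre_ restricts to the problem's natural domain (nonempty rectangular board, each skill a 6-tuple
-- whose rectangle lies inside the board): outside it A raises (empty board, out-of-range r1/c1,
-- short rows, short skill tuples) or — on ragged boards and out-of-board rectangles, where A still
-- returns — A's difference-array bookkeeping silently clips/skips cells that B's direct loops touch
-- (B counts whole ragged rows and raises on out-of-board rectangles); neither behaviour is specified.
def Pre_solution (board : List (List Int)) (skill : List (List Int)) : Prop :=
  board ≠ [] ∧ (∀ row ∈ board, row.length = (board.headD []).length) ∧
  (∀ s ∈ skill, pvSkillOK (board.length : Int) ((board.headD []).length : Int) s = true)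
instance (board : List (List Int)) (skill : List (List Int)) : Decidable (Pre_solution board skill) := by
  unfold Pre_solution; infer_instance

def pvWitness_solution : List (List Int) × List (List Int) := ([[1, 2], [3, 4]], [[1, 0, 0, 1, 0, 2]])

def Spec_solution (board : List (List Int)) (skill : List (List Int)) (out : Int) : Prop := out = solution_alt board skill
instance (board : List (List Int)) (skill : List (List Int)) (out : Int) : Decidable (Spec_solution board skill out) := by unfold Spec_solution; infer_instance

-- ===== CLAIM (what is proved, stated in full; the proofs are below) =====
def Claim_equal_solution : Prop := ∀ (board : List (List Int)) (skill : List (List Int)), Dom_solution board skill → Pre_solution board skill → Spec_solution board skill (solution board skill)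

-- ===== LEMMAS AND PROOFS =====

-- named forms of the loop bodies of the two ports (definitionally equal to the lambdas in the ports)
def pvStepA (M N : Int) (g : List (List Int)) (s : List Int) : List (List Int) :=
  match pvSix s with
  | some (t, r1, c1, r2, c2, degree) =>
    let value := if t == 1 then -degree else degree
    let g := pvAdd2 g r1 c1 value
    let g := if c2 + 1 < N then pvAdd2 g r1 (c2 + 1) (-value) else g
    let g := if r2 + 1 < M then pvAdd2 g (r2 + 1) c1 (-value) else g
    if c2 + 1 < N ∧ r2 + 1 < M then pvAdd2 g (r2 + 1) (c2 + 1) value else g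
  | none => g
def pvColPass (M x0 : Int) (g : List (List Int)) : List (List Int) :=
  (PySem.List.pyRange 0 M).foldl (fun g y => pvAdd2 g y x0 (pvGet2 g y (x0 - 1))) g
def pvRowPass (N y0 : Int) (g : List (List Int)) : List (List Int) :=
  (PySem.List.pyRange 0 N).foldl (fun g x => pvAdd2 g y0 x (pvGet2 g (y0 - 1) x)) g
def pvCountRow (g3 : List (List Int)) (N y : Int) (st : List (List Int) × Int) : List (List Int) × Int :=
  (PySem.List.pyRange 0 N).foldl (fun st x =>
    let nv := pvGet2 st.1 y x + pvGet2 g3 y x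
    (pvSet2 st.1 y x nv, if nv > 0 then st.2 + 1 else st.2)) st
def pvRectB (v r1 c1 r2 c2 : Int) (g : List (List Int)) : List (List Int) :=
  (PySem.List.pyRange r1 (r2 + 1)).foldl (fun b r =>
    (PySem.List.pyRange c1 (c2 + 1)).foldl (fun b c => pvAdd2 b r c v) b) g
def pvStepB (g : List (List Int)) (s : List Int) : List (List Int) :=
  match pvSix s with
  | some (t, r1, c1, r2, c2, degree) =>
    let value := if t == 1 then -degree else degree
    pvRectB value r1 c1 r2 c2 g
  | none => g

-- damage dealt by one well-formed skill / by the whole skill list at cell (y, x)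
def pvDmg1 (s : List Int) (y x : Int) : Int :=
  match pvSix s with
  | some (t, r1, c1, r2, c2, degree) =>
    if r1 ≤ y ∧ y ≤ r2 ∧ c1 ≤ x ∧ x ≤ c2 then (if t == 1 then -degree else degree) else 0
  | none => 0
def pvDmg (skill : List (List Int)) (y x : Int) : Int := (skill.map (fun s => pvDmg1 s y x)).sum

-- shape: every row has length N
def pvShp (N : Nat) (g : List (List Int)) : Prop := ∀ row ∈ g, row.length = N

-- prefix-sum abstractions used to characterise A's passes
def pvRowPre (g : List (List Int)) (y x : Int) : Int :=
  ((PySem.List.pyRange 0 (x + 1)).map (fun i => pvGet2 g y i)).sum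
def pvColPre (g : List (List Int)) (y x : Int) : Int :=
  ((PySem.List.pyRange 0 (y + 1)).map (fun j => pvGet2 g j x)).sum
def pvRectSum (g : List (List Int)) (y x : Int) : Int :=
  ((PySem.List.pyRange 0 (y + 1)).map (fun j =>
    ((PySem.List.pyRange 0 (x + 1)).map (fun i => pvGet2 g j i)).sum)).sum

lemma pvGet2_eq (g : List (List Int)) (y x : Int) (hy : 0 ≤ y) (hx : 0 ≤ x) :
    pvGet2 g y x = (g.getD y.toNat []).getD x.toNat 0 := by
  unfold pvGet2
  conv_lhs => rw [← Int.toNat_of_nonneg hy, ← Int.toNat_of_nonneg hx]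
  rw [PySem.List.pyGetD_natCast, PySem.List.pyGetD_natCast]

lemma pvSet2_eq (g : List (List Int)) (y x v : Int) (hy : 0 ≤ y) (hx : 0 ≤ x) :
    pvSet2 g y x v = g.set y.toNat ((g.getD y.toNat []).set x.toNat v) := by
  unfold pvSet2
  conv_lhs => rw [← Int.toNat_of_nonneg hy, ← Int.toNat_of_nonneg hx]
  simp only [PySem.List.pySetD_natCast, PySem.List.pyGetD_natCast]

lemma length_pvSet2 (g : List (List Int)) (y x v : Int) : (pvSet2 g y x v).length = g.length := by
  unfold pvSet2; exact PySem.List.length_pySetD _ _ _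

lemma length_pvAdd2 (g : List (List Int)) (y x v : Int) : (pvAdd2 g y x v).length = g.length := by
  unfold pvAdd2; exact length_pvSet2 _ _ _ _

lemma shp_pvSet2 {N : Nat} {g : List (List Int)} (hS : pvShp N g) (y x v : Int) (hy : 0 ≤ y) (hx : 0 ≤ x) :
    pvShp N (pvSet2 g y x v) := by
  rw [pvSet2_eq g y x v hy hx]
  by_cases hlt : y.toNat < g.length
  · intro row hrow
    rcases List.mem_or_eq_of_mem_set hrow with h | h
    · exact hS row h
    · subst h
      rw [List.length_set]
      have hg : g.getD y.toNat [] = g[y.toNat] := List.getD_eq_getElem g [] hlt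
      rw [hg]
      exact hS _ (List.getElem_mem hlt)
  · rw [List.set_eq_of_length_le (by omega)]
    exact hS

lemma shp_pvAdd2 {N : Nat} {g : List (List Int)} (hS : pvShp N g) (y x v : Int) (hy : 0 ≤ y) (hx : 0 ≤ x) :
    pvShp N (pvAdd2 g y x v) := shp_pvSet2 hS y x _ hy hx

lemma get2_set2 {N : Nat} {g : List (List Int)} (hS : pvShp N g) {y x : Int} (v : Int) {y' x' : Int}
    (hy : 0 ≤ y) (hyM : y < (g.length : Int)) (hx : 0 ≤ x) (hxN : x < (N : Int))
    (hy' : 0 ≤ y') (hx' : 0 ≤ x') :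
    pvGet2 (pvSet2 g y x v) y' x' = if y' = y ∧ x' = x then v else pvGet2 g y' x' := by
  have hyN : y.toNat < g.length := by omega
  have hrowlen : (g.getD y.toNat []).length = N := by
    have hg : g.getD y.toNat [] = g[y.toNat] := List.getD_eq_getElem g [] hyN
    rw [hg]; exact hS _ (List.getElem_mem hyN)
  rw [pvSet2_eq g y x v hy hx, pvGet2_eq _ y' x' hy' hx', pvGet2_eq g y' x' hy' hx']
  by_cases hyy : y' = y
  · subst hyy
    simp only [List.getD_eq_getElem?_getD, List.getElem?_set]
    rw [if_pos trivial, if_pos hyN, Option.getD_some]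
    have hlen2 : (g[y'.toNat]?.getD []) = g.getD y'.toNat [] := (List.getD_eq_getElem?_getD).symm
    by_cases hxx : x' = x
    · subst hxx
      simp only [List.getD_eq_getElem?_getD, List.getElem?_set]
      rw [if_pos trivial, if_pos (show x'.toNat < (g[y'.toNat]?.getD []).length by rw [hlen2]; omega),
        Option.getD_some]
      simp
    · simp only [List.getD_eq_getElem?_getD, List.getElem?_set]
      rw [if_neg (show ¬ x.toNat = x'.toNat by omega)]
      simp [hxx]
  · simp only [List.getD_eq_getElem?_getD, List.getElem?_set]
    rw [if_neg (show ¬ y.toNat = y'.toNat by omega)]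
    simp [hyy]

lemma get2_add2 {N : Nat} {g : List (List Int)} (hS : pvShp N g) {y x : Int} (v : Int) {y' x' : Int}
    (hy : 0 ≤ y) (hyM : y < (g.length : Int)) (hx : 0 ≤ x) (hxN : x < (N : Int))
    (hy' : 0 ≤ y') (hx' : 0 ≤ x') :
    pvGet2 (pvAdd2 g y x v) y' x' = pvGet2 g y' x' + (if y' = y ∧ x' = x then v else 0) := by
  unfold pvAdd2
  rw [get2_set2 hS _ hy hyM hx hxN hy' hx']
  by_cases h : y' = y ∧ x' = x
  · rcases h with ⟨h1, h2⟩; subst h1; subst h2; simp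
  · simp [h]

-- counting fold = accumulator + sum of 0/1 indicators
lemma foldl_pos_count (l : List Int) (a : Int) :
    l.foldl (fun a v => if v > 0 then a + 1 else a) a
      = a + ((l.map (fun v => if v > 0 then (1 : Int) else 0)).sum) := by
  induction l generalizing a with
  | nil => simp
  | cons h t ih => by_cases hp : h > 0 <;> simp [hp, ih] <;> ring

lemma sum_ite_single (l : List Int) (hl : l.Nodup) (p c : Int) :
    (l.map (fun j => if j = p then c else 0)).sum = if p ∈ l then c else 0 := by
  induction l with
  | nil => simp
  | cons h t ih =>
    rcases List.nodup_cons.mp hl with ⟨hh, ht⟩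
    by_cases hp : h = p
    · subst hp
      simp only [List.map_cons, List.sum_cons, if_pos rfl, List.mem_cons, true_or, if_pos]
      rw [ih ht]
      simp [hh]
    · simp only [List.map_cons, List.sum_cons, if_neg hp, List.mem_cons]
      rw [ih ht]
      have hph : ¬ (p = h) := fun e => hp e.symm
      simp [List.mem_cons, hph]

-- pvRectSum of the all-zero grid is 0
lemma getD_getD_zero (rows : List (List Int)) (hrows : ∀ r ∈ rows, ∀ v ∈ r, v = 0) (a b : Nat) :
    (rows.getD a []).getD b 0 = 0 := by
  by_cases ha : a < rows.length
  · rw [List.getD_eq_getElem rows [] ha]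
    by_cases hb : b < rows[a].length
    · rw [List.getD_eq_getElem _ 0 hb]
      exact hrows _ (List.getElem_mem ha) _ (List.getElem_mem hb)
    · rw [List.getD_eq_default _ _ (by omega)]
  · have h0 : rows.getD a [] = ([] : List Int) := List.getD_eq_default _ _ (by omega)
    rw [h0]
    simp [List.getD]

lemma get2_zeroGrid (M N : Int) (j i : Int) (hj : 0 ≤ j) (hi : 0 ≤ i) :
    pvGet2 ((PySem.List.pyRange 0 M).map (fun _ => (PySem.List.pyRange 0 N).map (fun _ => (0 : Int)))) j i = 0 := by
  rw [pvGet2_eq _ _ _ hj hi]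
  apply getD_getD_zero
  intro r hr v hv
  rcases List.mem_map.mp hr with ⟨_, _, rfl⟩
  rcases List.mem_map.mp hv with ⟨_, _, rfl⟩
  rfl

lemma rectSum_zeroGrid (M N : Int) (y x : Int) :
    pvRectSum ((PySem.List.pyRange 0 M).map (fun _ => (PySem.List.pyRange 0 N).map (fun _ => (0 : Int)))) y x = 0 := by
  unfold pvRectSum
  rw [List.sum_eq_zero]
  intro z hz
  rcases List.mem_map.mp hz with ⟨j, hj, rfl⟩
  rw [List.sum_eq_zero]
  intro w hw
  rcases List.mem_map.mp hw with ⟨i, hi, rfl⟩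
  exact get2_zeroGrid M N j i (PySem.List.mem_pyRange_one.mp hj).1 (PySem.List.mem_pyRange_one.mp hi).1

lemma rectSum_add2 {N : Nat} {g : List (List Int)} (hS : pvShp N g) {p q : Int} (v : Int)
    (hp : 0 ≤ p) (hpM : p < (g.length : Int)) (hq : 0 ≤ q) (hqN : q < (N : Int)) (y x : Int) :
    pvRectSum (pvAdd2 g p q v) y x = pvRectSum g y x + (if p ≤ y ∧ q ≤ x then v else 0) := by
  unfold pvRectSum
  have h1 : ∀ j ∈ PySem.List.pyRange 0 (y + 1),
      ((PySem.List.pyRange 0 (x + 1)).map (fun i => pvGet2 (pvAdd2 g p q v) j i)).sum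
        = ((PySem.List.pyRange 0 (x + 1)).map (fun i => pvGet2 g j i)).sum
          + (if j = p ∧ q ≤ x then v else 0) := by
    intro j hj
    obtain ⟨hj0, _⟩ := PySem.List.mem_pyRange_one.mp hj
    rw [List.map_congr_left (fun i hi => by
      exact get2_add2 hS v hp hpM hq hqN hj0 (PySem.List.mem_pyRange_one.mp hi).1),
      PySem.List.sum_map_add_int]
    congr 1
    by_cases hjp : j = p
    · subst hjp
      simp only [true_and]
      rw [sum_ite_single _ (PySem.List.nodup_pyRange_one 0 (x + 1)) q v]
      simp only [PySem.List.mem_pyRange_one]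
      by_cases hqx : q ≤ x
      · rw [if_pos ⟨hq, by omega⟩, if_pos hqx]
      · rw [if_neg (by omega), if_neg hqx]
    · simp [hjp]
  rw [List.map_congr_left h1, PySem.List.sum_map_add_int]
  congr 1
  by_cases hqx : q ≤ x
  · simp only [hqx, and_true]
    rw [sum_ite_single _ (PySem.List.nodup_pyRange_one 0 (y + 1)) p v]
    simp only [PySem.List.mem_pyRange_one]
    by_cases hpy : p ≤ y
    · rw [if_pos ⟨hp, by omega⟩, if_pos hpy]
    · rw [if_neg (by omega), if_neg hpy]
  · simp [hqx]

-- A mark phase: one skill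
lemma rectSum_stepA {M N : Nat} {g : List (List Int)} (hS : pvShp N g) (hL : g.length = M)
    (s : List Int) (hok : pvSkillOK (M : Int) (N : Int) s = true) (y x : Int)
    (hy : 0 ≤ y) (hyM : y < (M : Int)) (hx : 0 ≤ x) (hxN : x < (N : Int)) :
    pvRectSum (pvStepA (M : Int) (N : Int) g s) y x = pvRectSum g y x + pvDmg1 s y x := by
  rcases s with _ | ⟨t, _ | ⟨r1, _ | ⟨c1, _ | ⟨r2, _ | ⟨c2, _ | ⟨d, _ | ⟨e, rest⟩⟩⟩⟩⟩⟩⟩ <;>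
    simp only [pvSkillOK, pvSix, decide_eq_true_eq] at hok <;>
    try exact (Bool.false_ne_true hok).elim
  case cons.cons.cons.cons.cons.cons.nil =>
    obtain ⟨h1, h2, h3, h4, h5, h6⟩ := hok
    simp only [pvStepA, pvDmg1, pvSix]
    set v : Int := if t == 1 then -d else d with hv
    clear_value v
    have hg1 := shp_pvAdd2 hS r1 c1 v (by omega) (by omega)
    have hl1 : (pvAdd2 g r1 c1 v).length = M := by rw [length_pvAdd2]; exact hL
    have e1 : pvRectSum (pvAdd2 g r1 c1 v) y x
        = pvRectSum g y x + (if r1 ≤ y ∧ c1 ≤ x then v else 0) :=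
      rectSum_add2 hS v (by omega) (by omega) (by omega) (by omega) y x
    by_cases hc : c2 + 1 < (N : Int) <;> by_cases hr : r2 + 1 < (M : Int)
    · rw [if_pos hc, if_pos hr, if_pos ⟨hc, hr⟩]
      have hg2 := shp_pvAdd2 hg1 r1 (c2+1) (-v) (by omega) (by omega)
      have hl2 : (pvAdd2 (pvAdd2 g r1 c1 v) r1 (c2+1) (-v)).length = M := by
        rw [length_pvAdd2]; exact hl1
      have hg3 := shp_pvAdd2 hg2 (r2+1) c1 (-v) (by omega) (by omega)
      have hl3 : (pvAdd2 (pvAdd2 (pvAdd2 g r1 c1 v) r1 (c2+1) (-v)) (r2+1) c1 (-v)).length = M := by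
        rw [length_pvAdd2]; exact hl2
      rw [rectSum_add2 hg3 v (by omega) (by omega) (by omega) (by omega) y x,
        rectSum_add2 hg2 (-v) (by omega) (by omega) (by omega) (by omega) y x,
        rectSum_add2 hg1 (-v) (by omega) (by omega) (by omega) (by omega) y x, e1]
      split_ifs <;> omega
    · rw [if_pos hc, if_neg hr, if_neg (by tauto)]
      rw [rectSum_add2 hg1 (-v) (by omega) (by omega) (by omega) (by omega) y x, e1]
      split_ifs <;> omega
    · rw [if_neg hc, if_pos hr, if_neg (by tauto)]
      rw [rectSum_add2 hg1 (-v) (by omega) (by omega) (by omega) (by omega) y x, e1]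
      split_ifs <;> omega
    · rw [if_neg hc, if_neg hr, if_neg (by tauto)]
      rw [e1]
      split_ifs <;> omega

lemma shp_stepA {M N : Nat} {g : List (List Int)} (hS : pvShp N g) (hL : g.length = M)
    (s : List Int) (hok : pvSkillOK (M : Int) (N : Int) s = true) :
    pvShp N (pvStepA (M : Int) (N : Int) g s) ∧ (pvStepA (M : Int) (N : Int) g s).length = M := by
  rcases s with _ | ⟨t, _ | ⟨r1, _ | ⟨c1, _ | ⟨r2, _ | ⟨c2, _ | ⟨d, _ | ⟨e, rest⟩⟩⟩⟩⟩⟩⟩ <;>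
    simp only [pvSkillOK, pvSix, decide_eq_true_eq] at hok <;>
    try exact (Bool.false_ne_true hok).elim
  case cons.cons.cons.cons.cons.cons.nil =>
    obtain ⟨h1, h2, h3, h4, h5, h6⟩ := hok
    simp only [pvStepA, pvSix]
    set v : Int := if t == 1 then -d else d with hv
    clear_value v
    have step : ∀ (g' : List (List Int)) (p q w : Int), 0 ≤ p → 0 ≤ q →
        pvShp N g' ∧ g'.length = M → pvShp N (pvAdd2 g' p q w) ∧ (pvAdd2 g' p q w).length = M := by
      intro g' p q w hp hq ⟨a1, a2⟩
      exact ⟨shp_pvAdd2 a1 p q w hp hq, by rw [length_pvAdd2]; exact a2⟩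
    have base : pvShp N (pvAdd2 g r1 c1 v) ∧ (pvAdd2 g r1 c1 v).length = M :=
      step g r1 c1 v (by omega) (by omega) ⟨hS, hL⟩
    split_ifs <;>
      first
      | exact base
      | exact step _ _ _ _ (by omega) (by omega) base
      | exact step _ _ _ _ (by omega) (by omega) (step _ _ _ _ (by omega) (by omega) base)
      | exact step _ _ _ _ (by omega) (by omega)
          (step _ _ _ _ (by omega) (by omega) (step _ _ _ _ (by omega) (by omega) base))

-- A mark phase: the whole fold
lemma mark_fold {M N : Nat} :
    ∀ (skill : List (List Int)) (g : List (List Int)), pvShp N g → g.length = M →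
    (∀ s ∈ skill, pvSkillOK (M : Int) (N : Int) s = true) →
    pvShp N (skill.foldl (pvStepA (M : Int) (N : Int)) g)
    ∧ (skill.foldl (pvStepA (M : Int) (N : Int)) g).length = M
    ∧ ∀ y x : Int, 0 ≤ y → y < (M : Int) → 0 ≤ x → x < (N : Int) →
      pvRectSum (skill.foldl (pvStepA (M : Int) (N : Int)) g) y x = pvRectSum g y x + pvDmg skill y x := by
  intro skill
  induction skill with
  | nil => intro g hS hL _; exact ⟨hS, hL, by intro y x _ _ _ _; simp [pvDmg]⟩
  | cons s rest ih =>
    intro g hS hL hok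
    have hs := hok s (by simp)
    have hrest : ∀ s' ∈ rest, pvSkillOK (M : Int) (N : Int) s' = true := fun s' h => hok s' (by simp [h])
    obtain ⟨hS', hL'⟩ := shp_stepA hS hL s hs
    obtain ⟨h1, h2, h3⟩ := ih (pvStepA (M : Int) (N : Int) g s) hS' hL' hrest
    refine ⟨h1, h2, ?_⟩
    intro y x hy hyM hx hxN
    rw [List.foldl_cons] at *
    rw [h3 y x hy hyM hx hxN, rectSum_stepA hS hL s hs y x hy hyM hx hxN]
    simp [pvDmg]
    ring

-- B rectangle add: inner (one row), outer (rows), whole fold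
lemma rectB_cols {N : Nat} (v r : Int) (hr : 0 ≤ r) :
    ∀ (n : Nat) (a b : Int) (g : List (List Int)), (b - a).toNat = n → pvShp N g →
    r < (g.length : Int) → 0 ≤ a → b ≤ (N : Int) →
    pvShp N ((PySem.List.pyRange a b).foldl (fun g c => pvAdd2 g r c v) g)
    ∧ ((PySem.List.pyRange a b).foldl (fun g c => pvAdd2 g r c v) g).length = g.length
    ∧ ∀ y x : Int, 0 ≤ y → 0 ≤ x →
      pvGet2 ((PySem.List.pyRange a b).foldl (fun g c => pvAdd2 g r c v) g) y x
        = pvGet2 g y x + (if y = r ∧ a ≤ x ∧ x < b then v else 0) := by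
  intro n
  induction n with
  | zero =>
    intro a b g hn hS hr' _ _
    rw [PySem.List.pyRange_one_eq_nil (by omega)]
    exact ⟨hS, rfl, fun y x _ _ => by rw [if_neg (by omega)]; simp⟩
  | succ n ih =>
    intro a b g hn hS hrM ha hb
    have hab : a < b := by omega
    rw [PySem.List.pyRange_one_cons hab, List.foldl_cons]
    have hS' := shp_pvAdd2 hS r a v hr ha
    have hl' : (pvAdd2 g r a v).length = g.length := length_pvAdd2 g r a v
    obtain ⟨i1, i2, i3⟩ := ih (a + 1) b (pvAdd2 g r a v) (by omega) hS' (by omega) (by omega) hb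
    refine ⟨i1, by rw [i2, hl'], ?_⟩
    intro y x hy hx
    rw [i3 y x hy hx, get2_add2 hS v hr hrM ha (by omega) hy hx]
    generalize pvGet2 g y x = G
    split_ifs <;> omega

lemma rectB_rows {N : Nat} (v : Int) (c1 c2 : Int) (hc1 : 0 ≤ c1) (hc2 : c2 + 1 ≤ (N : Int)) :
    ∀ (n : Nat) (a b : Int) (g : List (List Int)), (b - a).toNat = n → pvShp N g →
    0 ≤ a → b ≤ (g.length : Int) →
    pvShp N ((PySem.List.pyRange a b).foldl (fun g r => (PySem.List.pyRange c1 (c2 + 1)).foldl (fun g c => pvAdd2 g r c v) g) g)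
    ∧ ((PySem.List.pyRange a b).foldl (fun g r => (PySem.List.pyRange c1 (c2 + 1)).foldl (fun g c => pvAdd2 g r c v) g) g).length = g.length
    ∧ ∀ y x : Int, 0 ≤ y → 0 ≤ x →
      pvGet2 ((PySem.List.pyRange a b).foldl (fun g r => (PySem.List.pyRange c1 (c2 + 1)).foldl (fun g c => pvAdd2 g r c v) g) g) y x
        = pvGet2 g y x + (if a ≤ y ∧ y < b ∧ c1 ≤ x ∧ x < c2 + 1 then v else 0) := by
  intro n
  induction n with
  | zero =>
    intro a b g hn hS _ _
    rw [PySem.List.pyRange_one_eq_nil (show b ≤ a by omega)]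
    exact ⟨hS, rfl, fun y x _ _ => by rw [if_neg (by omega)]; simp⟩
  | succ n ih =>
    intro a b g hn hS ha hb
    have hab : a < b := by omega
    rw [PySem.List.pyRange_one_cons hab, List.foldl_cons]
    obtain ⟨c1', c2', c3'⟩ := rectB_cols (N := N) v a ha ((c2 + 1 - c1).toNat) c1 (c2 + 1) g rfl hS
      (by omega) hc1 hc2
    obtain ⟨i1, i2, i3⟩ := ih (a + 1) b _ (by omega) c1' (by omega) (by rw [c2']; omega)
    refine ⟨i1, by rw [i2, c2'], ?_⟩
    intro y x hy hx
    rw [i3 y x hy hx, c3' y x hy hx]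
    generalize pvGet2 g y x = G
    split_ifs <;> omega

lemma b_fold {M N : Nat} :
    ∀ (skill : List (List Int)) (g : List (List Int)), pvShp N g → g.length = M →
    (∀ s ∈ skill, pvSkillOK (M : Int) (N : Int) s = true) →
    pvShp N (skill.foldl pvStepB g)
    ∧ (skill.foldl pvStepB g).length = M
    ∧ ∀ y x : Int, 0 ≤ y → 0 ≤ x →
      pvGet2 (skill.foldl pvStepB g) y x = pvGet2 g y x + pvDmg skill y x := by
  intro skill
  induction skill with
  | nil => intro g hS hL _; exact ⟨hS, hL, fun y x _ _ => by simp [pvDmg]⟩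
  | cons s rest ih =>
    intro g hS hL hok
    have hs := hok s (by simp)
    have hrest : ∀ s' ∈ rest, pvSkillOK (M : Int) (N : Int) s' = true := fun s' h => hok s' (by simp [h])
    rw [List.foldl_cons]
    rcases s with _ | ⟨t, _ | ⟨r1, _ | ⟨c1, _ | ⟨r2, _ | ⟨c2, _ | ⟨d, _ | ⟨e2, rest2⟩⟩⟩⟩⟩⟩⟩ <;>
      simp only [pvSkillOK, pvSix, decide_eq_true_eq] at hs <;>
      try exact (Bool.false_ne_true hs).elim
    case cons.cons.cons.cons.cons.cons.nil =>
      obtain ⟨h1, h2, h3, h4, h5, h6⟩ := hs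
      have hstep : pvStepB g [t, r1, c1, r2, c2, d]
          = pvRectB (if t == 1 then -d else d) r1 c1 r2 c2 g := rfl
      rw [hstep]
      set v : Int := if t == 1 then -d else d with hv
      obtain ⟨b1, b2, b3⟩ := rectB_rows (N := N) v c1 c2 h4 (by omega) ((r2 + 1 - r1).toNat) r1 (r2 + 1)
        g rfl hS h1 (by omega)
      have hlen : (pvRectB v r1 c1 r2 c2 g).length = M := by
        have : pvRectB v r1 c1 r2 c2 g
            = (PySem.List.pyRange r1 (r2 + 1)).foldl (fun g r => (PySem.List.pyRange c1 (c2 + 1)).foldl (fun g c => pvAdd2 g r c v) g) g := rfl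
        rw [this, b2, hL]
      obtain ⟨i1, i2, i3⟩ := ih (pvRectB v r1 c1 r2 c2 g) b1 hlen hrest
      refine ⟨i1, i2, ?_⟩
      intro y x hy hx
      rw [i3 y x hy hx]
      have hb3 := b3 y x hy hx
      rw [show ((PySem.List.pyRange r1 (r2 + 1)).foldl (fun g r => (PySem.List.pyRange c1 (c2 + 1)).foldl (fun g c => pvAdd2 g r c v) g) g) = pvRectB v r1 c1 r2 c2 g from rfl] at hb3
      rw [hb3]
      have hdmg : pvDmg ([t, r1, c1, r2, c2, d] :: rest) y x
          = (if r1 ≤ y ∧ y < r2 + 1 ∧ c1 ≤ x ∧ x < c2 + 1 then v else 0) + pvDmg rest y x := by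
        simp only [pvDmg, List.map_cons, List.sum_cons, pvDmg1, pvSix]
        congr 1
        rw [hv]
        split_ifs <;> first | rfl | omega
      rw [hdmg]
      ring

-- A x-pass: one column pass
lemma colPass_get {M N : Nat} (x0 : Int) (hx0 : 1 ≤ x0) (hx0N : x0 < (N : Int)) :
    ∀ (n : Nat) (a : Int) (g : List (List Int)), ((M : Int) - a).toNat = n → pvShp N g → g.length = M →
    0 ≤ a →
    pvShp N ((PySem.List.pyRange a (M : Int)).foldl (fun g y => pvAdd2 g y x0 (pvGet2 g y (x0 - 1))) g)
    ∧ ((PySem.List.pyRange a (M : Int)).foldl (fun g y => pvAdd2 g y x0 (pvGet2 g y (x0 - 1))) g).length = M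
    ∧ ∀ y x : Int, 0 ≤ y → 0 ≤ x →
      pvGet2 ((PySem.List.pyRange a (M : Int)).foldl (fun g y => pvAdd2 g y x0 (pvGet2 g y (x0 - 1))) g) y x
        = pvGet2 g y x + (if a ≤ y ∧ y < (M : Int) ∧ x = x0 then pvGet2 g y (x0 - 1) else 0) := by
  intro n
  induction n with
  | zero =>
    intro a g hn hS hL _
    rw [PySem.List.pyRange_one_eq_nil (show (M : Int) ≤ a by omega)]
    exact ⟨hS, hL, fun y x _ _ => by rw [if_neg (by omega)]; simp⟩
  | succ n ih =>
    intro a g hn hS hL ha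
    have hab : a < (M : Int) := by omega
    rw [PySem.List.pyRange_one_cons hab, List.foldl_cons]
    have hS' := shp_pvAdd2 hS a x0 (pvGet2 g a (x0 - 1)) ha (by omega)
    have hL' : (pvAdd2 g a x0 (pvGet2 g a (x0 - 1))).length = M := by rw [length_pvAdd2]; exact hL
    obtain ⟨i1, i2, i3⟩ := ih (a + 1) _ (by omega) hS' hL' (by omega)
    refine ⟨i1, i2, ?_⟩
    intro y x hy hx
    rw [i3 y x hy hx]
    have hadd := fun (x' : Int) (hx' : 0 ≤ x') =>
      get2_add2 hS (pvGet2 g a (x0 - 1)) ha (by omega) (by omega : (0:Int) ≤ x0) (by omega) hy hx'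
    rw [hadd x hx, hadd (x0 - 1) (by omega)]
    rw [if_neg (by omega : ¬ (y = a ∧ x0 - 1 = x0))]
    by_cases hya : y = a
    · subst hya
      by_cases hxx : x = x0
      · subst hxx
        rw [if_pos ⟨rfl, rfl⟩, if_neg (by omega), if_pos (by omega)]
        ring
      · rw [if_neg (by simp [hxx]), if_neg (by omega), if_neg (by omega)]
        ring
    · by_cases h2 : a + 1 ≤ y ∧ y < (M : Int) ∧ x = x0
      · rw [if_neg (by simp [hya]), if_pos h2, if_pos (by omega)]
        ring
      · rw [if_neg (by simp [hya]), if_neg h2, if_neg (by omega)]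
        ring

-- prefix recurrences
lemma rowPre_succ (g : List (List Int)) (y x : Int) (hx : 0 ≤ x) :
    pvRowPre g y x = pvRowPre g y (x - 1) + pvGet2 g y x := by
  unfold pvRowPre
  rw [PySem.List.pyRange_one_succ_right (by omega : (0:Int) ≤ x)]
  simp

lemma colPre_succ (g : List (List Int)) (y x : Int) (hy : 0 ≤ y) :
    pvColPre g y x = pvColPre g (y - 1) x + pvGet2 g y x := by
  unfold pvColPre
  rw [PySem.List.pyRange_one_succ_right (by omega : (0:Int) ≤ y)]
  simp

-- the two ports, re-expressed with the named loop bodies (definitional equalities)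
-- A x-loop invariant
lemma xLoop_get {M N : Nat} (g : List (List Int)) (hS : pvShp N g) (hL : g.length = M) :
    ∀ (k : Nat), k ≤ N →
    pvShp N ((PySem.List.pyRange 1 (k : Int)).foldl (fun g x => pvColPass (M : Int) x g) g)
    ∧ ((PySem.List.pyRange 1 (k : Int)).foldl (fun g x => pvColPass (M : Int) x g) g).length = M
    ∧ ∀ y x : Int, 0 ≤ y → y < (M : Int) → 0 ≤ x → x < (N : Int) →
      pvGet2 ((PySem.List.pyRange 1 (k : Int)).foldl (fun g x => pvColPass (M : Int) x g) g) y x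
        = if x < (k : Int) then pvRowPre g y x else pvGet2 g y x := by
  intro k
  induction k with
  | zero =>
    intro _
    rw [PySem.List.pyRange_one_eq_nil (by simp)]
    exact ⟨hS, hL, fun y x hy hyM hx hxN => by rw [if_neg (by push_cast; omega)]; simp⟩
  | succ k ih =>
    intro hk
    obtain ⟨i1, i2, i3⟩ := ih (by omega)
    rw [show (((k + 1 : Nat)) : Int) = (k : Int) + 1 by push_cast; ring]
    by_cases hk0 : k = 0
    · subst hk0
      simp only [Nat.cast_zero]
      rw [PySem.List.pyRange_one_eq_nil (by norm_num), List.foldl_nil]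
      refine ⟨hS, hL, fun y x hy hyM hx hxN => ?_⟩
      by_cases hx1 : x < (0 : Int) + 1
      · have hx0 : x = 0 := by omega
        subst hx0
        rw [if_pos (by omega)]
        unfold pvRowPre
        rw [show (0 : Int) + 1 = 0 + 1 by ring, PySem.List.pyRange_one_singleton]
        simp
      · rw [if_neg hx1]
    · have hk1 : (1 : Int) ≤ (k : Int) := by exact_mod_cast Nat.one_le_iff_ne_zero.mpr hk0
      rw [PySem.List.pyRange_one_succ_right hk1, List.foldl_append, List.foldl_cons, List.foldl_nil]
      have hkN : (k : Int) < (N : Int) := by exact_mod_cast hk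
      obtain ⟨c1, c2, c3⟩ := colPass_get (M := M) (N := N) (k : Int) hk1 hkN M 0
        (List.foldl (fun g x => pvColPass (M : Int) x g) g (PySem.List.pyRange 1 (k : Int)))
        (by simp) i1 i2 (by omega)
      have hcp : pvColPass (M : Int) (k : Int)
            (List.foldl (fun g x => pvColPass (M : Int) x g) g (PySem.List.pyRange 1 (k : Int)))
          = (PySem.List.pyRange 0 (M : Int)).foldl (fun g y => pvAdd2 g y (k : Int) (pvGet2 g y ((k : Int) - 1)))
            (List.foldl (fun g x => pvColPass (M : Int) x g) g (PySem.List.pyRange 1 (k : Int))) := rfl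
      rw [hcp]
      refine ⟨c1, c2, fun y x hy hyM hx hxN => ?_⟩
      rw [c3 y x hy hx, i3 y x hy hyM hx hxN]
      by_cases hxk : x = (k : Int)
      · subst hxk
        rw [if_neg (by omega), if_pos ⟨by omega, hyM, rfl⟩, if_pos (by omega)]
        rw [i3 _ _ hy hyM (by omega) (by omega), if_pos (by omega)]
        rw [rowPre_succ g y (k : Int) (by omega)]
        ring
      · by_cases hxk' : x < (k : Int)
        · rw [if_pos hxk', if_neg (by omega), if_pos (by omega)]
          ring
        · rw [if_neg hxk', if_neg (by omega), if_neg (by omega)]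
          ring

-- A y-pass: one row pass
lemma rowPass_get {M N : Nat} (y0 : Int) (hy0 : 1 ≤ y0) (hy0M : y0 < (M : Int)) :
    ∀ (n : Nat) (a : Int) (g : List (List Int)), ((N : Int) - a).toNat = n → pvShp N g → g.length = M →
    0 ≤ a →
    pvShp N ((PySem.List.pyRange a (N : Int)).foldl (fun g x => pvAdd2 g y0 x (pvGet2 g (y0 - 1) x)) g)
    ∧ ((PySem.List.pyRange a (N : Int)).foldl (fun g x => pvAdd2 g y0 x (pvGet2 g (y0 - 1) x)) g).length = M
    ∧ ∀ y x : Int, 0 ≤ y → 0 ≤ x →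
      pvGet2 ((PySem.List.pyRange a (N : Int)).foldl (fun g x => pvAdd2 g y0 x (pvGet2 g (y0 - 1) x)) g) y x
        = pvGet2 g y x + (if y = y0 ∧ a ≤ x ∧ x < (N : Int) then pvGet2 g (y0 - 1) x else 0) := by
  intro n
  induction n with
  | zero =>
    intro a g hn hS hL _
    rw [PySem.List.pyRange_one_eq_nil (show (N : Int) ≤ a by omega)]
    exact ⟨hS, hL, fun y x _ _ => by rw [if_neg (by omega)]; simp⟩
  | succ n ih =>
    intro a g hn hS hL ha
    have hab : a < (N : Int) := by omega
    rw [PySem.List.pyRange_one_cons hab, List.foldl_cons]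
    have hS' := shp_pvAdd2 hS y0 a (pvGet2 g (y0 - 1) a) (by omega) ha
    have hL' : (pvAdd2 g y0 a (pvGet2 g (y0 - 1) a)).length = M := by rw [length_pvAdd2]; exact hL
    obtain ⟨i1, i2, i3⟩ := ih (a + 1) _ (by omega) hS' hL' (by omega)
    refine ⟨i1, i2, ?_⟩
    intro y x hy hx
    rw [i3 y x hy hx]
    have hadd := fun (y' x' : Int) (hy' : 0 ≤ y') (hx' : 0 ≤ x') =>
      get2_add2 hS (pvGet2 g (y0 - 1) a) (by omega : (0:Int) ≤ y0) (by omega) ha hab hy' hx'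
    rw [hadd y x hy hx, hadd (y0 - 1) x (by omega) hx]
    rw [if_neg (by omega : ¬ (y0 - 1 = y0 ∧ x = a))]
    by_cases hya : y = y0
    · subst hya
      by_cases hxx : x = a
      · subst hxx
        rw [if_pos ⟨rfl, rfl⟩, if_neg (by omega), if_pos (by omega)]
        ring
      · by_cases h2 : a + 1 ≤ x ∧ x < (N : Int)
        · rw [if_neg (by simp [hxx]), if_pos ⟨rfl, h2.1, h2.2⟩, if_pos (by omega)]
          ring
        · rw [if_neg (by simp [hxx]), if_neg (by tauto), if_neg (by omega)]
          ring
    · rw [if_neg (by simp [hya]), if_neg (by tauto), if_neg (by tauto)]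
      ring

-- A y-loop invariant
lemma yLoop_get {M N : Nat} (g : List (List Int)) (hS : pvShp N g) (hL : g.length = M) :
    ∀ (k : Nat), k ≤ M →
    pvShp N ((PySem.List.pyRange 1 (k : Int)).foldl (fun g y => pvRowPass (N : Int) y g) g)
    ∧ ((PySem.List.pyRange 1 (k : Int)).foldl (fun g y => pvRowPass (N : Int) y g) g).length = M
    ∧ ∀ y x : Int, 0 ≤ y → y < (M : Int) → 0 ≤ x → x < (N : Int) →
      pvGet2 ((PySem.List.pyRange 1 (k : Int)).foldl (fun g y => pvRowPass (N : Int) y g) g) y x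
        = if y < (k : Int) then pvColPre g y x else pvGet2 g y x := by
  intro k
  induction k with
  | zero =>
    intro _
    rw [PySem.List.pyRange_one_eq_nil (by simp)]
    exact ⟨hS, hL, fun y x hy hyM hx hxN => by rw [if_neg (by push_cast; omega)]; simp⟩
  | succ k ih =>
    intro hk
    obtain ⟨i1, i2, i3⟩ := ih (by omega)
    rw [show (((k + 1 : Nat)) : Int) = (k : Int) + 1 by push_cast; ring]
    by_cases hk0 : k = 0
    · subst hk0
      simp only [Nat.cast_zero]
      rw [PySem.List.pyRange_one_eq_nil (by norm_num), List.foldl_nil]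
      refine ⟨hS, hL, fun y x hy hyM hx hxN => ?_⟩
      by_cases hy1 : y < (0 : Int) + 1
      · have hy0 : y = 0 := by omega
        subst hy0
        rw [if_pos (by omega)]
        unfold pvColPre
        rw [show (0 : Int) + 1 = 0 + 1 by ring, PySem.List.pyRange_one_singleton]
        simp
      · rw [if_neg hy1]
    · have hk1 : (1 : Int) ≤ (k : Int) := by exact_mod_cast Nat.one_le_iff_ne_zero.mpr hk0
      rw [PySem.List.pyRange_one_succ_right hk1, List.foldl_append, List.foldl_cons, List.foldl_nil]
      have hkM : (k : Int) < (M : Int) := by exact_mod_cast hk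
      obtain ⟨c1, c2, c3⟩ := rowPass_get (M := M) (N := N) (k : Int) hk1 hkM N 0
        (List.foldl (fun g y => pvRowPass (N : Int) y g) g (PySem.List.pyRange 1 (k : Int)))
        (by simp) i1 i2 (by omega)
      have hcp : pvRowPass (N : Int) (k : Int)
            (List.foldl (fun g y => pvRowPass (N : Int) y g) g (PySem.List.pyRange 1 (k : Int)))
          = (PySem.List.pyRange 0 (N : Int)).foldl (fun g x => pvAdd2 g (k : Int) x (pvGet2 g ((k : Int) - 1) x))
            (List.foldl (fun g y => pvRowPass (N : Int) y g) g (PySem.List.pyRange 1 (k : Int))) := rfl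
      rw [hcp]
      refine ⟨c1, c2, fun y x hy hyM hx hxN => ?_⟩
      rw [c3 y x hy hx, i3 y x hy hyM hx hxN]
      by_cases hyk : y = (k : Int)
      · subst hyk
        rw [if_neg (by omega), if_pos ⟨rfl, by omega, hxN⟩, if_pos (by omega)]
        rw [i3 _ _ (by omega) (by omega) hx hxN, if_pos (by omega)]
        rw [colPre_succ g (k : Int) x (by omega)]
        ring
      · by_cases hyk' : y < (k : Int)
        · rw [if_pos hyk', if_neg (by omega), if_pos (by omega)]
          ring
        · rw [if_neg hyk', if_neg (by omega), if_neg (by omega)]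
          ring

-- A count loops
lemma countRow_spec {M N : Nat} (g3 board : List (List Int)) (y0 : Int) (hy0 : 0 ≤ y0) (hy0M : y0 < (M : Int)) :
    ∀ (n : Nat) (a : Int) (b : List (List Int)) (ans : Int), ((N : Int) - a).toNat = n →
    pvShp N b → b.length = M → 0 ≤ a →
    (∀ x : Int, a ≤ x → x < (N : Int) → pvGet2 b y0 x = pvGet2 board y0 x) →
    ((PySem.List.pyRange a (N : Int)).foldl (fun st x =>
        let nv := pvGet2 st.1 y0 x + pvGet2 g3 y0 x
        (pvSet2 st.1 y0 x nv, if nv > 0 then st.2 + 1 else st.2)) (b, ans)).2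
      = ans + ((PySem.List.pyRange a (N : Int)).map (fun x =>
          if pvGet2 board y0 x + pvGet2 g3 y0 x > 0 then (1 : Int) else 0)).sum
    ∧ pvShp N ((PySem.List.pyRange a (N : Int)).foldl (fun st x =>
        let nv := pvGet2 st.1 y0 x + pvGet2 g3 y0 x
        (pvSet2 st.1 y0 x nv, if nv > 0 then st.2 + 1 else st.2)) (b, ans)).1
    ∧ ((PySem.List.pyRange a (N : Int)).foldl (fun st x =>
        let nv := pvGet2 st.1 y0 x + pvGet2 g3 y0 x
        (pvSet2 st.1 y0 x nv, if nv > 0 then st.2 + 1 else st.2)) (b, ans)).1.length = M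
    ∧ ∀ y x : Int, 0 ≤ y → 0 ≤ x → y ≠ y0 →
      pvGet2 (((PySem.List.pyRange a (N : Int)).foldl (fun st x =>
        let nv := pvGet2 st.1 y0 x + pvGet2 g3 y0 x
        (pvSet2 st.1 y0 x nv, if nv > 0 then st.2 + 1 else st.2)) (b, ans)).1) y x = pvGet2 b y x := by
  intro n
  induction n with
  | zero =>
    intro a b ans hn hS hL ha Hb
    rw [PySem.List.pyRange_one_eq_nil (show (N : Int) ≤ a by omega)]
    exact ⟨by simp, hS, hL, fun y x _ _ _ => rfl⟩
  | succ n ih =>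
    intro a b ans hn hS hL ha Hb
    have hab : a < (N : Int) := by omega
    rw [PySem.List.pyRange_one_cons hab, List.foldl_cons, List.map_cons, List.sum_cons]
    dsimp only
    have hS' : pvShp N (pvSet2 b y0 a (pvGet2 b y0 a + pvGet2 g3 y0 a)) :=
      shp_pvSet2 hS y0 a _ hy0 ha
    have hL' : (pvSet2 b y0 a (pvGet2 b y0 a + pvGet2 g3 y0 a)).length = M := by
      rw [length_pvSet2]; exact hL
    have Hb' : ∀ x : Int, a + 1 ≤ x → x < (N : Int) →
        pvGet2 (pvSet2 b y0 a (pvGet2 b y0 a + pvGet2 g3 y0 a)) y0 x = pvGet2 board y0 x := by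
      intro x hx1 hx2
      rw [get2_set2 hS _ hy0 (by omega) ha hab hy0 (by omega), if_neg (by omega)]
      exact Hb x (by omega) hx2
    obtain ⟨j1, j2, j3, j4⟩ := ih (a + 1) _ _ (by omega) hS' hL' (by omega) Hb'
    refine ⟨?_, j2, j3, ?_⟩
    · rw [j1, Hb a (by omega) hab]
      split_ifs <;> ring
    · intro y x hy hx hyne
      rw [j4 y x hy hx hyne, get2_set2 hS _ hy0 (by omega) ha hab hy hx, if_neg (by simp [hyne])]

lemma countA_spec {M N : Nat} (g3 board : List (List Int)) :
    ∀ (n : Nat) (m : Int) (b : List (List Int)) (ans : Int), ((M : Int) - m).toNat = n →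
    pvShp N b → b.length = M → 0 ≤ m →
    (∀ y x : Int, m ≤ y → y < (M : Int) → 0 ≤ x → x < (N : Int) → pvGet2 b y x = pvGet2 board y x) →
    ((PySem.List.pyRange m (M : Int)).foldl (fun st y => pvCountRow g3 (N : Int) y st) (b, ans)).2
      = ans + ((PySem.List.pyRange m (M : Int)).map (fun y =>
          ((PySem.List.pyRange 0 (N : Int)).map (fun x =>
            if pvGet2 board y x + pvGet2 g3 y x > 0 then (1 : Int) else 0)).sum)).sum := by
  intro n
  induction n with
  | zero =>
    intro m b ans hn _ _ hm _
    rw [PySem.List.pyRange_one_eq_nil (show (M : Int) ≤ m by omega)]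
    simp
  | succ n ih =>
    intro m b ans hn hS hL hm Hb
    have hmM : m < (M : Int) := by omega
    rw [PySem.List.pyRange_one_cons hmM, List.foldl_cons, List.map_cons, List.sum_cons]
    obtain ⟨j1, j2, j3, j4⟩ := countRow_spec (M := M) (N := N) g3 board m hm hmM N 0 b ans
      (by simp) hS hL (by omega) (fun x _ hx2 => Hb m x (by omega) hmM (by omega) hx2)
    have hcr : pvCountRow g3 (N : Int) m (b, ans)
        = (PySem.List.pyRange 0 (N : Int)).foldl (fun st x =>
            let nv := pvGet2 st.1 m x + pvGet2 g3 m x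
            (pvSet2 st.1 m x nv, if nv > 0 then st.2 + 1 else st.2)) (b, ans) := rfl
    rcases hst : ((PySem.List.pyRange 0 (N : Int)).foldl (fun st x =>
        let nv := pvGet2 st.1 m x + pvGet2 g3 m x
        (pvSet2 st.1 m x nv, if nv > 0 then st.2 + 1 else st.2)) (b, ans)) with ⟨b2, ans2⟩
    rw [hst] at j1 j2 j3 j4
    rw [hcr, hst]
    have Hb' : ∀ y x : Int, m + 1 ≤ y → y < (M : Int) → 0 ≤ x → x < (N : Int) →
        pvGet2 b2 y x = pvGet2 board y x := by
      intro y x hy1 hy2 hx1 hx2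
      rw [j4 y x (by omega) hx1 (by omega)]
      exact Hb y x (by omega) hy2 hx1 hx2
    rw [ih (m + 1) b2 ans2 (by omega) j2 j3 (by omega) Hb']
    have j1' : ans2 = ans + ((PySem.List.pyRange 0 (N : Int)).map (fun x =>
        if pvGet2 board m x + pvGet2 g3 m x > 0 then (1 : Int) else 0)).sum := j1
    rw [j1']
    ring

-- B count: fold over rows = indexed double sum
lemma countB_spec {M N : Nat} (b2 : List (List Int)) (hS : pvShp N b2) (hL : b2.length = M) :
    b2.foldl (fun a row => row.foldl (fun a v => if v > 0 then a + 1 else a) a) 0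
      = ((PySem.List.pyRange 0 (M : Int)).map (fun y =>
          ((PySem.List.pyRange 0 (N : Int)).map (fun x =>
            if pvGet2 b2 y x > 0 then (1 : Int) else 0)).sum)).sum := by
  have hrows : ∀ (rows : List (List Int)) (a : Int),
      rows.foldl (fun a row => row.foldl (fun a v => if v > 0 then a + 1 else a) a) a
        = a + (rows.map (fun row => (row.map (fun v => if v > 0 then (1 : Int) else 0)).sum)).sum := by
    intro rows
    induction rows with
    | nil => intro a; simp
    | cons r t iht =>
      intro a
      rw [List.foldl_cons, iht, foldl_pos_count, List.map_cons, List.sum_cons]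
      ring
  rw [hrows b2 0, zero_add]
  have hlen : PySem.List.len b2 = (M : Int) := by simp [PySem.List.len, hL]
  conv_lhs => rw [← PySem.List.map_pyGetD_pyRange_zero b2 ([] : List Int)]
  rw [hlen, List.map_map]
  apply congrArg
  apply List.map_congr_left
  intro j hj
  obtain ⟨hj0, hjM⟩ := PySem.List.mem_pyRange_one.mp hj
  have hjlen : j < (b2.length : Int) := by rw [hL]; exact_mod_cast hjM
  have hjn : j.toNat < b2.length := by omega
  have hrow : PySem.List.pyGetD b2 j [] = b2[j.toNat]'hjn :=
    PySem.List.pyGetD_eq_getElem b2 [] hj0 hjlen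
  have hrlen : PySem.List.len (PySem.List.pyGetD b2 j []) = (N : Int) := by
    rw [hrow]
    simp [PySem.List.len, hS _ (List.getElem_mem hjn)]
  show ((PySem.List.pyGetD b2 j []).map (fun v => if v > 0 then (1 : Int) else 0)).sum = _
  conv_lhs => rw [← PySem.List.map_pyGetD_pyRange_zero (PySem.List.pyGetD b2 j []) (0 : Int)]
  rw [hrlen, List.map_map]
  rfl

-- the two ports, re-expressed with the named loop bodies (definitional equalities)
lemma solution_eq (board skill : List (List Int)) :
    solution board skill =
      (((PySem.List.pyRange 0 (board.length : Int)).foldl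
        (fun st y => pvCountRow
          ((PySem.List.pyRange 1 (board.length : Int)).foldl
            (fun g y => pvRowPass ((PySem.List.pyGetD board 0 []).length : Int) y g)
            ((PySem.List.pyRange 1 ((PySem.List.pyGetD board 0 []).length : Int)).foldl
              (fun g x => pvColPass (board.length : Int) x g)
              (skill.foldl (pvStepA (board.length : Int) ((PySem.List.pyGetD board 0 []).length : Int))
                ((PySem.List.pyRange 0 (board.length : Int)).map
                  (fun _ => (PySem.List.pyRange 0 ((PySem.List.pyGetD board 0 []).length : Int)).map
                    (fun _ => (0 : Int)))))))
          ((PySem.List.pyGetD board 0 []).length : Int) y st)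
        (board, (0 : Int))).2) := rfl

lemma solution_alt_eq (board skill : List (List Int)) :
    solution_alt board skill =
      (skill.foldl pvStepB board).foldl
        (fun a row => row.foldl (fun a v => if v > 0 then a + 1 else a) a) 0 := rfl

-- ===== VERDICT (by name: the statement is the Claim_ definition above) =====
theorem solution_spec : Claim_equal_solution := by
  intro board skill _ hpre
  obtain ⟨hne, hrect, hok⟩ := hpre
  unfold Spec_solution
  have h0 : PySem.List.pyGetD board 0 [] = board.headD [] := by
    cases board with
    | nil => exact absurd rfl hne
    | cons h t => simp [PySem.List.pyGetD_zero, List.getD]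
  rw [solution_eq, solution_alt_eq, h0]
  set Mv := board.length with hMv
  set Nv := (board.headD []).length with hNv
  set G0 := (PySem.List.pyRange 0 (Mv : Int)).map
      (fun _ => (PySem.List.pyRange 0 (Nv : Int)).map (fun _ => (0 : Int))) with hG0
  set G1 := skill.foldl (pvStepA (Mv : Int) (Nv : Int)) G0 with hG1
  set G2 := (PySem.List.pyRange 1 (Nv : Int)).foldl (fun g x => pvColPass (Mv : Int) x g) G1 with hG2
  set G3 := (PySem.List.pyRange 1 (Mv : Int)).foldl (fun g y => pvRowPass (Nv : Int) y g) G2 with hG3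
  set B2 := skill.foldl pvStepB board with hB2
  have hshpB : pvShp Nv board := fun row hr => hrect row hr
  have hg0len : G0.length = Mv := by
    rw [hG0, List.length_map, PySem.List.length_pyRange_one]; omega
  have hg0shp : pvShp Nv G0 := by
    rw [hG0]
    intro row hr
    rcases List.mem_map.mp hr with ⟨_, _, rfl⟩
    rw [List.length_map, PySem.List.length_pyRange_one]; omega
  obtain ⟨m1, m2, m3⟩ := mark_fold (M := Mv) (N := Nv) skill G0 hg0shp hg0len hok
  rw [← hG1] at m1 m2 m3
  obtain ⟨x1, x2, x3⟩ := xLoop_get (M := Mv) (N := Nv) G1 m1 m2 Nv (le_refl _)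
  rw [← hG2] at x1 x2 x3
  obtain ⟨y1, y2, y3⟩ := yLoop_get (M := Mv) (N := Nv) G2 x1 x2 Mv (le_refl _)
  rw [← hG3] at y1 y2 y3
  have hg3 : ∀ y x : Int, 0 ≤ y → y < (Mv : Int) → 0 ≤ x → x < (Nv : Int) →
      pvGet2 G3 y x = pvDmg skill y x := by
    intro y x hy hyM hx hxN
    rw [y3 y x hy hyM hx hxN, if_pos hyM]
    have hcol : pvColPre G2 y x = pvRectSum G1 y x := by
      unfold pvColPre pvRectSum
      apply congrArg
      apply List.map_congr_left
      intro j hj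
      obtain ⟨hj0, hjy⟩ := PySem.List.mem_pyRange_one.mp hj
      rw [x3 j x hj0 (by omega) hx hxN, if_pos hxN]
      rfl
    rw [hcol, m3 y x hy hyM hx hxN, hG0, rectSum_zeroGrid]
    ring
  have hA := countA_spec (M := Mv) (N := Nv) G3 board Mv 0 board 0 (by simp) hshpB rfl
    (by omega) (fun _ _ _ _ _ _ => rfl)
  rw [hA, zero_add]
  obtain ⟨b1, b2len, b3⟩ := b_fold (M := Mv) (N := Nv) skill board hshpB rfl hok
  rw [← hB2] at b1 b2len b3
  rw [countB_spec (M := Mv) (N := Nv) B2 b1 b2len]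
  apply congrArg
  apply List.map_congr_left
  intro y hy
  obtain ⟨hy0, hyM⟩ := PySem.List.mem_pyRange_one.mp hy
  apply congrArg
  apply List.map_congr_left
  intro x hx
  obtain ⟨hx0, hxN⟩ := PySem.List.mem_pyRange_one.mp hx
  rw [hg3 y x hy0 hyM hx0 hxN, b3 y x hy0 hx0]
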